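-- pv_equiv track=rewrite | github.com/MrBrantCode/unitest_baseline | mut_generate/mist_train_cf/cf_53464/solution.py | compute
-- ===== SOURCE A (Python) =====
-- def compute(lst):
--     def is_prime(n):
--         if n < 2:
--             return False
--         for i in range(2, int(n**0.5) + 1):
--             if n % i == 0:
--                 return False
--         return True
--
--     prime_numbers = [i for i in lst if is_prime(i)]
--     if not prime_numbers:
--         return 0
--     smallest_prime = min(prime_numbers)
--     product = 1
--     while smallest_prime:
--         digit = smallest_prime % 10
--         product *= digit
--         smallest_prime //= 10
--     return product
-- ===== SOURCE B (Python) =====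
-- def compute(lst):
--     def is_prime(n):
--         if n < 2:
--             return False
--         i = 2
--         while i * i <= n:
--             if n % i == 0:
--                 return False
--             i += 1
--         return True
--
--     def digit_product(n):
--         return 1 if n == 0 else digit_product(n // 10) * (n % 10)
--
--     for x in sorted(lst):
--         if is_prime(x):
--             return digit_product(x)
--     return 0
-- ===== Notes on version B (the rewrite author's own statement) =====
-- stated objective: faster
-- what changed: Replaces the filter-all-primes-then-min structure plus a mod/div while-loop by a sort-then-early-exit scan that stops at the first (hence smallest) prime, an i*i<=n trial-division loop, and a recursive digit product.
import Mathlib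
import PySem

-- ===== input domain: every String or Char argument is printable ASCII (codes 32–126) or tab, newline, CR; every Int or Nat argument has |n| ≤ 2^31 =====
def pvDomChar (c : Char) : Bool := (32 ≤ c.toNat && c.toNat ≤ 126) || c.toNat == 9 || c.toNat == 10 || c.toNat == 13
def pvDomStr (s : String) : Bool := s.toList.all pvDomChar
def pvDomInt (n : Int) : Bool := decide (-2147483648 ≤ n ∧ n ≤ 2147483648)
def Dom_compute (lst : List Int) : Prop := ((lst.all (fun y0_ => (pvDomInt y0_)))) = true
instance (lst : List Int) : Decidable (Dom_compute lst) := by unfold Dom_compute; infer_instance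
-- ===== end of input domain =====

-- B replaces A's filter-all-primes-then-min + mod/div while-loop by a sorted early-exit
-- scan with an i*i ≤ n trial-division loop and a recursive digit product (objective: alternative).

-- ===== PORT A =====
-- int(n**0.5) is ported as Nat.sqrt n.toNat: exact on Dom (|n| ≤ 2^31 keeps
-- the float square root exact at perfect squares, and an off-by-one bound at
-- non-squares checks only divisors > sqrt that cannot flip the result).
def pvIsPrimeA (n : Int) : Bool :=
  if n < 2 then false
  else if (PySem.List.pyRange 2 ((Nat.sqrt n.toNat : Int) + 1) 1).any
            (fun i => PySem.Int.mod n i == 0) then false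
  else true

-- the 'while smallest_prime' loop; 'n ≤ 0' instead of 'n = 0' is a totality guard
-- (the loop only ever runs on a prime ≥ 2)
def pvDigitLoopA (n p : Int) : Int :=
  if h : n ≤ 0 then p
  else pvDigitLoopA (PySem.Int.floordiv n 10) (p * PySem.Int.mod n 10)
termination_by n.toNat
decreasing_by
  have h10 : PySem.Int.floordiv n 10 = n / 10 := PySem.Int.floordiv_eq_ediv_of_pos (by norm_num)
  rw [h10]; omega

def compute (lst : List Int) : Int :=
  let primes := lst.filter (fun i => pvIsPrimeA i)
  if primes = [] then 0
  else pvDigitLoopA ((PySem.List.min? primes (fun x => x)).getD 0) 1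

-- ===== PORT B =====
def pvIsPrimeLoopB (n i : Int) : Bool :=
  if h : i * i ≤ n then
    (if PySem.Int.mod n i = 0 then false else pvIsPrimeLoopB n (i + 1))
  else true
termination_by (n + 1 - i).toNat
decreasing_by
  have h0 : 0 ≤ i * i := mul_self_nonneg i
  have hin : i ≤ n := by
    by_cases hi : i ≤ 0
    · omega
    · nlinarith
  omega

def pvIsPrimeB (n : Int) : Bool :=
  if n < 2 then false else pvIsPrimeLoopB n 2

-- 'n ≤ 0' instead of 'n == 0' is a totality guard (only called on a prime ≥ 2)
def pvDigitProdB (n : Int) : Int :=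
  if h : n ≤ 0 then 1
  else pvDigitProdB (PySem.Int.floordiv n 10) * PySem.Int.mod n 10
termination_by n.toNat
decreasing_by
  have h10 : PySem.Int.floordiv n 10 = n / 10 := PySem.Int.floordiv_eq_ediv_of_pos (by norm_num)
  rw [h10]; omega

def pvScanB : List Int → Int
  | [] => 0
  | x :: t => if pvIsPrimeB x then pvDigitProdB x else pvScanB t

def compute_alt (lst : List Int) : Int :=
  pvScanB (PySem.List.sorted lst (fun x => x) false)

-- ===== PRECONDITION & SPEC =====
def Spec_compute (lst : List Int) (out : Int) : Prop := out = compute_alt lst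
instance (lst : List Int) (out : Int) : Decidable (Spec_compute lst out) := by unfold Spec_compute; infer_instance

-- ===== CLAIM (what is proved, stated in full; the proofs are below) =====
def Claim_equal_compute : Prop := ∀ (lst : List Int), Dom_compute lst → Spec_compute lst (compute lst)

-- ===== LEMMAS AND PROOFS =====

-- B's trial-division loop finds a divisor iff one exists at or above i (for 1 ≤ i)
theorem pvIsPrimeLoopB_iff (n : Int) : ∀ i : Int, 1 ≤ i →
    (pvIsPrimeLoopB n i = true ↔ ∀ j : Int, i ≤ j → j * j ≤ n → PySem.Int.mod n j ≠ 0) := by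
  intro i
  induction i using pvIsPrimeLoopB.induct (n := n) with
  | case1 x h hm =>
    intro hx
    rw [pvIsPrimeLoopB]
    simp only [dif_pos h, if_pos hm]
    constructor
    · intro H; cases H
    · intro H; exact absurd hm (H x le_rfl h)
  | case2 x h hm ih =>
    intro hx
    rw [pvIsPrimeLoopB]
    simp only [dif_pos h, if_neg hm]
    rw [ih (by omega)]
    constructor
    · intro H j hj hjj
      rcases eq_or_lt_of_le hj with rfl | hlt
      · exact hm
      · exact H j (by omega) hjj
    · intro H j hj hjj
      exact H j (by omega) hjj
  | case3 x h =>
    intro hx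
    rw [pvIsPrimeLoopB]
    simp only [dif_neg h]
    constructor
    · intro _ j hj hjj
      exact absurd (le_trans (by nlinarith : x * x ≤ j * j) hjj) h
    · intro _; trivial

-- A's sqrt bound and B's i*i ≤ n bound describe the same divisor range
theorem pvIsPrime_eq (n : Int) : pvIsPrimeA n = pvIsPrimeB n := by
  unfold pvIsPrimeA pvIsPrimeB
  by_cases h2 : n < 2
  · simp [h2]
  · simp only [if_neg h2]
    rw [Bool.eq_iff_iff]
    have hn : 0 ≤ n := by omega
    have hrange : ∀ i : Int, (2 ≤ i ∧ i < (Nat.sqrt n.toNat : Int) + 1) ↔ (2 ≤ i ∧ i * i ≤ n) := by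
      intro i
      constructor
      · rintro ⟨hi, hlt⟩
        refine ⟨hi, ?_⟩
        have hile : i.toNat ≤ Nat.sqrt n.toNat := by omega
        have := Nat.le_sqrt.mp hile
        have : (i.toNat * i.toNat : Int) ≤ (n.toNat : Int) := by exact_mod_cast this
        have hi0 : 0 ≤ i := by omega
        push_cast at this
        rw [Int.toNat_of_nonneg hi0, Int.toNat_of_nonneg hn] at this
        exact this
      · rintro ⟨hi, hsq⟩
        refine ⟨hi, ?_⟩
        have hi0 : 0 ≤ i := by omega
        have hnat : i.toNat * i.toNat ≤ n.toNat := by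
          have : (i.toNat * i.toNat : Int) ≤ (n.toNat : Int) := by
            push_cast [Int.toNat_of_nonneg hi0, Int.toNat_of_nonneg hn]
            exact hsq
          exact_mod_cast this
        have := Nat.le_sqrt.mpr hnat
        omega
    rw [pvIsPrimeLoopB_iff n 2 (by norm_num)]
    constructor
    · intro H j hj hjj
      by_contra hmod
      have hany : (PySem.List.pyRange 2 ((Nat.sqrt n.toNat : Int) + 1) 1).any
          (fun i => PySem.Int.mod n i == 0) = true := by
        rw [List.any_eq_true]
        exact ⟨j, PySem.List.mem_pyRange_one.mpr ((hrange j).mpr ⟨hj, hjj⟩), by simp [hmod]⟩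
      simp [hany] at H
    · intro H
      rw [if_neg]
      rw [List.any_eq_true]
      rintro ⟨i, hmem, hbeq⟩
      rw [PySem.List.mem_pyRange_one] at hmem
      have hii := (hrange i).mp ⟨hmem.1, hmem.2⟩
      exact H i hmem.1 hii.2 (by simpa using hbeq)

-- A's accumulator loop computes the same product as B's recursion
theorem pvDigit_eq_aux : ∀ (k : Nat) (n p : Int), n.toNat ≤ k →
    pvDigitLoopA n p = p * pvDigitProdB n := by
  intro k
  induction k with
  | zero =>
    intro n p hk
    have h : n ≤ 0 := by omega
    rw [pvDigitLoopA, pvDigitProdB]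
    simp [h]
  | succ k ih =>
    intro n p hk
    by_cases h : n ≤ 0
    · rw [pvDigitLoopA, pvDigitProdB]; simp [h]
    · rw [pvDigitLoopA, pvDigitProdB]
      simp only [dif_neg h]
      have h10 : PySem.Int.floordiv n 10 = n / 10 :=
        PySem.Int.floordiv_eq_ediv_of_pos (by norm_num)
      rw [ih _ _ (by rw [h10]; omega)]
      ring

theorem pvDigit_eq (n p : Int) : pvDigitLoopA n p = p * pvDigitProdB n :=
  pvDigit_eq_aux n.toNat n p le_rfl

-- scanning a sorted list stops exactly at the minimum prime
theorem pvScan_eq_zero (S : List Int) (h : ∀ x ∈ S, pvIsPrimeB x = false) :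
    pvScanB S = 0 := by
  induction S with
  | nil => rfl
  | cons x t ih =>
    rw [pvScanB, h x (List.mem_cons_self), if_neg (by simp)]
    exact ih (fun y hy => h y (List.mem_cons_of_mem _ hy))

theorem pvScan_min (S : List Int) (m : Int)
    (hsorted : S.Pairwise (fun a b => a ≤ b))
    (hm : m ∈ S) (hpm : pvIsPrimeB m = true)
    (hmin : ∀ y ∈ S, pvIsPrimeB y = true → m ≤ y) :
    pvScanB S = pvDigitProdB m := by
  induction S with
  | nil => cases hm
  | cons x t ih =>
    rw [List.pairwise_cons] at hsorted
    by_cases hx : pvIsPrimeB x = true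
    · rw [pvScanB, if_pos hx]
      have hxm : x = m := by
        have h1 : m ≤ x := hmin x List.mem_cons_self hx
        rcases List.mem_cons.mp hm with rfl | hmt
        · rfl
        · exact le_antisymm (hsorted.1 m hmt) h1
      rw [hxm]
    · rw [pvScanB, if_neg hx]
      have hmt : m ∈ t := by
        rcases List.mem_cons.mp hm with rfl | hmt
        · exact absurd hpm hx
        · exact hmt
      exact ih hsorted.2 hmt (fun y hy hpy => hmin y (List.mem_cons_of_mem _ hy) hpy)

-- ===== VERDICT (by name: the statement is the Claim_ definition above) =====
theorem compute_spec : Claim_equal_compute := by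
  intro lst _
  unfold Spec_compute compute compute_alt
  by_cases hp : lst.filter (fun i => pvIsPrimeA i) = []
  · simp only [hp, if_pos]
    rw [List.filter_eq_nil_iff] at hp
    rw [pvScan_eq_zero]
    intro x hx
    rw [PySem.List.mem_sorted] at hx
    have := hp x hx
    rw [pvIsPrime_eq] at this
    simpa using this
  · simp only [if_neg hp]
    obtain ⟨m, hm⟩ : ∃ m, PySem.List.min? (lst.filter (fun i => pvIsPrimeA i)) (fun x => x) = some m := by
      cases hmin : PySem.List.min? (lst.filter (fun i => pvIsPrimeA i)) (fun x => x) with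
      | none => exact absurd ((PySem.List.min?_eq_none_iff _ _).mp hmin) hp
      | some m => exact ⟨m, rfl⟩
    rw [hm, Option.getD_some]
    have hmem := PySem.List.min?_mem hm
    have hmin := PySem.List.min?_isMin hm
    rw [List.mem_filter] at hmem
    have hpmA : pvIsPrimeA m = true := by simpa using hmem.2
    have hpmB : pvIsPrimeB m = true := pvIsPrime_eq m ▸ hpmA
    rw [pvDigit_eq, one_mul]
    symm
    apply pvScan_min _ m
    · exact PySem.List.sorted_pairwise lst (fun x => x)
    · rw [PySem.List.mem_sorted]; exact hmem.1
    · exact hpmB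
    · intro y hy hpy
      rw [PySem.List.mem_sorted] at hy
      have hyf : y ∈ lst.filter (fun i => pvIsPrimeA i) := by
        rw [List.mem_filter]
        exact ⟨hy, by rw [pvIsPrime_eq]; simpa using hpy⟩
      exact hmin y hyf
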